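-- pv_equiv track=rewrite | github.com/blossom22/11_Inflearn_Algorithm | 6_greedy_4.py | solution
-- ===== SOURCE A (Python) =====
-- def solution(nums, k):
--     answer = 0
--     n = len(nums)
--     for i in range(k+1):
--         hap = 0
--         for j in range(i):
--             hap += nums[j]
--         for j in range(n-k+i,n):
--             hap += nums[j]
--         answer = max(hap, answer)
--     return answer
-- ===== SOURCE B (Python) =====
-- def solution(nums, k):
--     # Running-sum reimplementation: start from the all-back window (i = 0),
--     # then for each i slide one element from the back window to the front prefix.
--     n = len(nums)
--     cur = sum(nums[n - k:])
--     best = cur if cur > 0 else 0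
--     for i in range(1, k + 1):
--         cur += nums[i - 1] - nums[n - k + i - 1]
--         if cur > best:
--             best = cur
--     return best
-- ===== Notes on version B (the rewrite author's own statement) =====
-- stated objective: faster
-- what changed: Replaces the O(k*n) recomputation of the i-front/(k-i)-back sum for every i by one initial back-window sum and an O(1) sliding update per i, keeping the running max.
import Mathlib
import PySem

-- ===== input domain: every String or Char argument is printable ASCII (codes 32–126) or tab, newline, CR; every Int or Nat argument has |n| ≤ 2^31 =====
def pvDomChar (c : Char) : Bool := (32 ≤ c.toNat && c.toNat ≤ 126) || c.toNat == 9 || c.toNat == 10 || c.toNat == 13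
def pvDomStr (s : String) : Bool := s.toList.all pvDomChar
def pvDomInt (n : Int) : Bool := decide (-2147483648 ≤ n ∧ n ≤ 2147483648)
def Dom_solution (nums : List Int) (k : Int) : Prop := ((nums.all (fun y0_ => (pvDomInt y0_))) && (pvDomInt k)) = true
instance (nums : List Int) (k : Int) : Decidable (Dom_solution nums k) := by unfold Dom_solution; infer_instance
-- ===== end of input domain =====

-- B replaces A's per-i recomputation of the front/back sums by one initial back-window
-- sum and a constant-time sliding update per i (O(n+k) instead of O(k*n)).

-- ===== PORT A =====
def solution (nums : List Int) (k : Int) : Int :=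
  let n : Int := nums.length
  (PySem.List.pyRange 0 (k + 1) 1).foldl
    (fun answer i =>
      let hap : Int := (PySem.List.pyRange 0 i 1).foldl
        (fun h j => h + PySem.List.pyGetD nums j 0) 0
      let hap : Int := (PySem.List.pyRange (n - k + i) n 1).foldl
        (fun h j => h + PySem.List.pyGetD nums j 0) hap
      max hap answer) 0

-- ===== PORT B =====
def solution_alt (nums : List Int) (k : Int) : Int :=
  let n : Int := nums.length
  let cur0 : Int := (PySem.List.slice nums (some (n - k)) none).sum
  let res := (PySem.List.pyRange 1 (k + 1) 1).foldl
    (fun s i =>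
      let cur := s.1 + PySem.List.pyGetD nums (i - 1) 0
                     - PySem.List.pyGetD nums (n - k + i - 1) 0
      (cur, if s.2 < cur then cur else s.2))
    (cur0, if 0 < cur0 then cur0 else 0)
  res.2

-- ===== PRECONDITION & SPEC =====
-- A raises IndexError whenever k exceeds len(nums) (its prefix loop reads nums[len(nums)]); only those inputs are excluded.
def Pre_solution (nums : List Int) (k : Int) : Prop := k ≤ (nums.length : Int)
instance (nums : List Int) (k : Int) : Decidable (Pre_solution nums k) := by unfold Pre_solution; infer_instance
def pvWitness_solution : List Int × Int := ([3, -1, 4], 2)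

def Spec_solution (nums : List Int) (k : Int) (out : Int) : Prop := out = solution_alt nums k
instance (nums : List Int) (k : Int) (out : Int) : Decidable (Spec_solution nums k out) := by unfold Spec_solution; infer_instance

-- ===== CLAIM (what is proved, stated in full; the proofs are below) =====
def Claim_equal_solution : Prop := ∀ (nums : List Int) (k : Int), Dom_solution nums k → Pre_solution nums k → Spec_solution nums k (solution nums k)

-- ===== LEMMAS AND PROOFS =====

-- the value A computes at index i: front-i sum plus back-(k-i) sum, as range sums
def pvF (nums : List Int) (k i : Int) : Int :=
  ((PySem.List.pyRange 0 i 1).map (fun j => PySem.List.pyGetD nums j 0)).sum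
  + ((PySem.List.pyRange ((nums.length : Int) - k + i) (nums.length : Int) 1).map
      (fun j => PySem.List.pyGetD nums j 0)).sum

lemma pvF_rec (nums : List Int) (k i : Int) (h1 : 1 ≤ i) (h2 : i ≤ k) :
    pvF nums k i = pvF nums k (i - 1)
      + PySem.List.pyGetD nums (i - 1) 0
      - PySem.List.pyGetD nums ((nums.length : Int) - k + i - 1) 0 := by
  unfold pvF
  have e1 : PySem.List.pyRange 0 i 1
      = PySem.List.pyRange 0 (i - 1) 1 ++ [i - 1] := by
    have := PySem.List.pyRange_one_succ_right (a := 0) (b := i - 1) (by omega)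
    simpa using this
  have e2 : PySem.List.pyRange ((nums.length : Int) - k + (i - 1)) (nums.length : Int) 1
      = ((nums.length : Int) - k + i - 1)
        :: PySem.List.pyRange ((nums.length : Int) - k + i) (nums.length : Int) 1 := by
    have := PySem.List.pyRange_one_cons
      (a := (nums.length : Int) - k + (i - 1)) (b := (nums.length : Int)) (by omega)
    rw [this]; ring_nf
  rw [e1, e2]
  simp [List.map_append]
  ring

lemma solution_eq_maxfold (nums : List Int) (k : Int) :
    solution nums k
      = (PySem.List.pyRange 0 (k + 1) 1).foldl (fun ans i => max (pvF nums k i) ans) 0 := by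
  unfold solution
  refine PySem.List.foldl_congr_mem _ _ _ _ ?_
  intro ans i _
  simp only [PySem.List.foldl_add]
  unfold pvF
  ring_nf

lemma if_max (a b : Int) : (if a < b then b else a) = max b a := by
  by_cases h : a < b
  · simp [h, max_eq_left h.le]
  · simp [h, max_eq_right (not_lt.mp h)]

-- the coupled loop invariant: B's fold over range(1, m+1) carries (pvF m, A's running max over 0..m)
lemma coupled (nums : List Int) (k : Int) (m : Nat) (hm : (m : Int) ≤ k) :
    (PySem.List.pyRange 1 ((m : Int) + 1) 1).foldl
      (fun s i =>
        let cur := s.1 + PySem.List.pyGetD nums (i - 1) 0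
                       - PySem.List.pyGetD nums ((nums.length : Int) - k + i - 1) 0
        (cur, if s.2 < cur then cur else s.2))
      (pvF nums k 0, if (0 : Int) < pvF nums k 0 then pvF nums k 0 else 0)
    = (pvF nums k m,
       (PySem.List.pyRange 0 ((m : Int) + 1) 1).foldl (fun ans i => max (pvF nums k i) ans) 0) := by
  induction m with
  | zero =>
    have h1 : PySem.List.pyRange 1 ((0 : Int) + 1) 1 = [] :=
      PySem.List.pyRange_one_eq_nil (by omega)
    have h2 : PySem.List.pyRange 0 ((0 : Int) + 1) 1 = [(0 : Int)] := by
      simpa using PySem.List.pyRange_one_singleton (a := 0)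
    simp only [Nat.cast_zero, h1, h2, List.foldl]
    by_cases h : (0 : Int) < pvF nums k 0
    · simp [h, max_eq_left h.le]
    · simp [h, max_eq_right (not_lt.mp h)]
  | succ m ih =>
    have hm' : (m : Int) ≤ k := by push_cast at hm ⊢; omega
    have e1 : PySem.List.pyRange 1 (((m : Nat) + 1 : Nat) + 1 : Int) 1
        = PySem.List.pyRange 1 ((m : Int) + 1) 1 ++ [(m : Int) + 1] := by
      have := PySem.List.pyRange_one_succ_right (a := 1) (b := (m : Int) + 1) (by omega)
      rw [show ((((m : Nat) + 1 : Nat) : Int) + 1) = ((m : Int) + 1) + 1 by push_cast; ring]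
      exact this
    have e2 : PySem.List.pyRange 0 (((m : Nat) + 1 : Nat) + 1 : Int) 1
        = PySem.List.pyRange 0 ((m : Int) + 1) 1 ++ [(m : Int) + 1] := by
      have := PySem.List.pyRange_one_succ_right (a := 0) (b := (m : Int) + 1) (by omega)
      rw [show ((((m : Nat) + 1 : Nat) : Int) + 1) = ((m : Int) + 1) + 1 by push_cast; ring]
      exact this
    rw [e1, e2, List.foldl_append, List.foldl_append, ih hm']
    simp only [List.foldl]
    have hrec : pvF nums k ((m : Int) + 1)
        = pvF nums k m + PySem.List.pyGetD nums ((m : Int) + 1 - 1) 0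
          - PySem.List.pyGetD nums ((nums.length : Int) - k + ((m : Int) + 1) - 1) 0 := by
      have := pvF_rec nums k ((m : Int) + 1) (by omega) (by push_cast at hm; omega)
      simpa using this
    simp only [Prod.mk.injEq]
    refine ⟨?_, ?_⟩
    · push_cast; rw [hrec]
    · rw [if_max]
      have : pvF nums k m + PySem.List.pyGetD nums ((m : Int) + 1 - 1) 0
          - PySem.List.pyGetD nums ((nums.length : Int) - k + ((m : Int) + 1) - 1) 0
          = pvF nums k ((m : Int) + 1) := by rw [hrec]
      rw [this]

lemma cur0_eq (nums : List Int) (k : Int) (hk : k ≤ (nums.length : Int)) :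
    (PySem.List.slice nums (some ((nums.length : Int) - k)) none).sum = pvF nums k 0 := by
  unfold pvF
  have h0 : PySem.List.pyRange 0 0 1 = ([] : List Int) :=
    PySem.List.pyRange_one_eq_nil le_rfl
  rw [PySem.List.slice_from nums (a := (nums.length : Int) - k) (by omega)]
  simp only [add_zero]
  rw [PySem.List.map_pyGetD_pyRange' nums 0 (a := (nums.length : Int) - k) (by omega)]
  simp [h0]

-- ===== VERDICT (by name: the statement is the Claim_ definition above) =====
theorem solution_spec : Claim_equal_solution := by
  intro nums k _ hpre
  unfold Spec_solution
  by_cases hk : 0 ≤ k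
  · -- 0 ≤ k ≤ len
    rw [solution_eq_maxfold]
    unfold solution_alt
    simp only []
    rw [cur0_eq nums k hpre]
    have hm : ((k.toNat : Nat) : Int) = k := Int.toNat_of_nonneg hk
    have := coupled nums k k.toNat (by omega)
    rw [hm] at this
    rw [this]
  · -- k < 0 : both folds are empty, result 0
    have hA : PySem.List.pyRange 0 (k + 1) 1 = [] :=
      PySem.List.pyRange_one_eq_nil (by omega)
    have hB : PySem.List.pyRange 1 (k + 1) 1 = [] :=
      PySem.List.pyRange_one_eq_nil (by omega)
    have hdrop : PySem.List.slice nums (some ((nums.length : Int) - k)) none = [] := by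
      rw [PySem.List.slice_from nums (a := (nums.length : Int) - k) (by omega)]
      exact List.drop_eq_nil_of_le (by omega)
    unfold solution solution_alt
    simp [hA, hB, hdrop]
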